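-- pv_equiv track=rewrite | github.com/davidgasquez/advent-of-code-2018 | 02/02.py | part_1
-- ===== SOURCE A (Python) =====
-- from collections import Counter
--
-- def part_1(input):
--     twice = 0
--     thrice = 0
--
--     for i in input:
--         f = Counter(i)
--         if 2 in f.values():
--             twice += 1
--         if 3 in f.values():
--             thrice += 1
--
--     return twice * thrice
-- ===== SOURCE B (Python) =====
-- def _run_lengths(s):
--     cs = sorted(s)
--     runs = []
--     if not cs:
--         return runs
--     prev = cs[0]
--     n = 1
--     for c in cs[1:]:
--         if c == prev:
--             n += 1
--         else:
--             runs.append(n)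
--             prev = c
--             n = 1
--     runs.append(n)
--     return runs
--
--
-- def part_1(input):
--     twice = 0
--     thrice = 0
--
--     for i in input:
--         runs = _run_lengths(i)
--         if 2 in runs:
--             twice += 1
--         if 3 in runs:
--             thrice += 1
--
--     return twice * thrice
-- ===== Notes on version B (the rewrite author's own statement) =====
-- stated objective: alternative
-- what changed: Per-string letter multiplicities are derived by sorting the characters and scanning run lengths of equal consecutive letters, instead of building a Counter hash map.
import Mathlib
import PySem

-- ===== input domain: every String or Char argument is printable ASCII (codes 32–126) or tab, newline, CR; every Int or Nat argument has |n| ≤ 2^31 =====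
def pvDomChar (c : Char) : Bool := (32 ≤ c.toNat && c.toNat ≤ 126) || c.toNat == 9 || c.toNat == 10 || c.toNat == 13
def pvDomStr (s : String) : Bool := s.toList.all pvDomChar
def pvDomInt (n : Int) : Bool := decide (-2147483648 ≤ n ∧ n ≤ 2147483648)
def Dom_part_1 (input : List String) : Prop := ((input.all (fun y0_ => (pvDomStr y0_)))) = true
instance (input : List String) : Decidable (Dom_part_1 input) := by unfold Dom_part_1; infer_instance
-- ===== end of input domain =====

-- B derives each string's letter multiplicities by sorting its characters and scanning run
-- lengths of equal consecutive letters, instead of building a Counter; alternative decomposition.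


-- ===== PORT A =====
def part_1 (input : List String) : Int :=
  let p := input.foldl
    (fun (p : Int × Int) i =>
      let f := PySem.Dict.counter i.toList
      let p1 := if (2 : Int) ∈ f.values then (p.1 + 1, p.2) else p
      if (3 : Int) ∈ f.values then (p1.1, p1.2 + 1) else p1)
    (0, 0)
  p.1 * p.2

-- ===== PORT B =====
-- the inner for-loop of _run_lengths (state: prev, n, accumulated runs appended on return)
def pvRunGo (prev : Char) (n : Nat) : List Char → List Nat
  | [] => [n]
  | c :: rest => if c = prev then pvRunGo prev (n + 1) rest else n :: pvRunGo c 1 rest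

def pvRunLengths (s : String) : List Nat :=
  match PySem.List.sorted s.toList (fun x => x) false with
  | [] => []
  | c :: rest => pvRunGo c 1 rest

def part_1_alt (input : List String) : Int :=
  let p := input.foldl
    (fun (p : Int × Int) i =>
      let runs := pvRunLengths i
      let p1 := if 2 ∈ runs then (p.1 + 1, p.2) else p
      if 3 ∈ runs then (p1.1, p1.2 + 1) else p1)
    (0, 0)
  p.1 * p.2

-- ===== PRECONDITION & SPEC =====
def Spec_part_1 (input : List String) (out : Int) : Prop := out = part_1_alt input
instance (input : List String) (out : Int) : Decidable (Spec_part_1 input out) := by unfold Spec_part_1; infer_instance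

-- ===== CLAIM (what is proved, stated in full; the proofs are below) =====
def Claim_equal_part_1 : Prop := ∀ (input : List String), Dom_part_1 input → Spec_part_1 input (part_1 input)

-- ===== LEMMAS AND PROOFS =====

-- On a sorted tail whose elements all dominate `prev`, the run scan yields exactly the
-- multiplicities: the current run extended by prev's count, plus the counts of the other letters.
theorem pvRunGo_mem (l : List Char) : ∀ (prev : Char) (n m : Nat),
    l.Pairwise (· ≤ ·) → (∀ d ∈ l, prev ≤ d) →
    (m ∈ pvRunGo prev n l ↔ m = n + l.count prev ∨ ∃ d ∈ l, d ≠ prev ∧ l.count d = m) := by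
  induction l with
  | nil => simp [pvRunGo]
  | cons c rest ih =>
    intro prev n m hs hc
    have hrest : rest.Pairwise (· ≤ ·) := hs.tail
    by_cases hcp : c = prev
    · subst hcp
      have hc' : ∀ d ∈ rest, c ≤ d := fun d hd => hc d (List.mem_cons_of_mem _ hd)
      rw [pvRunGo, if_pos rfl, ih c (n + 1) m hrest hc']
      constructor
      · rintro (h | ⟨d, hd, hdc, hcnt⟩)
        · left; simp [h]; omega
        · right
          exact ⟨d, List.mem_cons_of_mem _ hd, hdc,
            by simp [Ne.symm hdc, hcnt]⟩
      · rintro (h | ⟨d, hd, hdc, hcnt⟩)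
        · left; simp at h; omega
        · rcases List.mem_cons.mp hd with rfl | hd
          · exact absurd rfl hdc
          · exact Or.inr ⟨d, hd, hdc, by simpa [List.count_cons, Ne.symm hdc] using hcnt⟩
    · have hlt : prev < c := lt_of_le_of_ne (hc c (List.mem_cons_self)) (fun h => hcp h.symm)
      have hge : ∀ d ∈ rest, c ≤ d := fun d hd => (List.pairwise_cons.mp hs).1 d hd
      have hnp : prev ∉ (c :: rest) := by
        intro hmem
        rcases List.mem_cons.mp hmem with h | h
        · exact hcp h.symm
        · exact absurd (hge prev h) (not_le.mpr hlt)
      have hcnt0 : (c :: rest).count prev = 0 := List.count_eq_zero.mpr hnp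
      rw [pvRunGo, if_neg hcp]
      rw [List.mem_cons, ih c 1 m hrest hge]
      constructor
      · rintro (rfl | h | ⟨d, hd, hdc, hcnt⟩)
        · left; omega
        · right
          exact ⟨c, List.mem_cons_self, fun h => hcp h, by simp [h]; omega⟩
        · right
          refine ⟨d, List.mem_cons_of_mem _ hd, ?_, by simp [Ne.symm hdc, hcnt]⟩
          intro h; subst h
          exact absurd (hge d hd) (not_le.mpr hlt)
      · rintro (h | ⟨d, hd, hdp, hcnt⟩)
        · left; omega
        · rcases List.mem_cons.mp hd with rfl | hd
          · right; left; simp at hcnt; omega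
          · by_cases hdc : d = c
            · subst hdc; right; left; simp at hcnt; omega
            · right; right; exact ⟨d, hd, hdc, by simpa [List.count_cons, Ne.symm hdc] using hcnt⟩

-- the run lengths of the sorted characters are exactly the multiset of letter counts
theorem pvRunLengths_mem (s : String) (m : Nat) :
    m ∈ pvRunLengths s ↔ ∃ c ∈ s.toList, s.toList.count c = m := by
  unfold pvRunLengths
  have hperm := PySem.List.sorted_perm s.toList (fun x => x) false
  have hpw : (PySem.List.sorted s.toList (fun x => x) false).Pairwise (· ≤ ·) := by
    simpa using PySem.List.sorted_pairwise s.toList (fun x => x)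
  rcases hsrt : PySem.List.sorted s.toList (fun x => x) false with _ | ⟨c, rest⟩
  · constructor
    · simp
    · rintro ⟨d, hd, _⟩
      exact absurd ((hperm.mem_iff).mpr hd) (by simp [hsrt])
  · rw [hsrt] at hperm hpw
    have hrest : rest.Pairwise (· ≤ ·) := hpw.tail
    have hge : ∀ d ∈ rest, c ≤ d := fun d hd => (List.pairwise_cons.mp hpw).1 d hd
    rw [pvRunGo_mem rest c 1 m hrest hge]
    constructor
    · rintro (h | ⟨d, hd, hdc, hcnt⟩)
      · refine ⟨c, (hperm.mem_iff).mp List.mem_cons_self, ?_⟩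
        rw [← hperm.count_eq]; simp; omega
      · refine ⟨d, (hperm.mem_iff).mp (List.mem_cons_of_mem _ hd), ?_⟩
        rw [← hperm.count_eq]; simpa [List.count_cons, Ne.symm hdc] using hcnt
    · rintro ⟨d, hd, hcnt⟩
      rw [← hperm.count_eq] at hcnt
      by_cases hdc : d = c
      · subst hdc; left; simp at hcnt; omega
      · right
        have hd' : d ∈ rest := by
          rcases List.mem_cons.mp ((hperm.mem_iff).mpr hd) with h | h
          · exact absurd h hdc
          · exact h
        exact ⟨d, hd', hdc, by simpa [List.count_cons, Ne.symm hdc] using hcnt⟩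

-- the per-string membership tests of A (Counter values) and B (sorted-run lengths) agree
theorem pv_values_iff (s : String) (k : Nat) :
    ((k : Int) ∈ (PySem.Dict.counter s.toList).values ↔ k ∈ pvRunLengths s) := by
  rw [pvRunLengths_mem]
  have : (PySem.Dict.counter s.toList).values
      = (PySem.Set.ofList s.toList).map (fun c => (s.toList.count c : Int)) := by
    show ((PySem.Dict.counter s.toList).items).map (·.2) = _
    rw [PySem.Dict.items_counter]
    simp
  rw [this]
  simp only [List.mem_map]
  constructor
  · rintro ⟨c, hc, hcnt⟩
    exact ⟨c, (PySem.Set.mem_ofList _ _).mp hc, (by exact_mod_cast hcnt.symm : k = s.toList.count c).symm⟩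
  · rintro ⟨c, hc, hcnt⟩
    exact ⟨c, (PySem.Set.mem_ofList _ _).mpr hc, by exact_mod_cast hcnt⟩

-- ===== VERDICT (by name: the statement is the Claim_ definition above) =====
theorem part_1_spec : Claim_equal_part_1 := by
  intro input _
  show part_1 input = part_1_alt input
  unfold part_1 part_1_alt
  have hstep : (fun (p : Int × Int) (i : String) =>
      let f := PySem.Dict.counter i.toList
      let p1 := if (2 : Int) ∈ f.values then (p.1 + 1, p.2) else p
      if (3 : Int) ∈ f.values then (p1.1, p1.2 + 1) else p1)
    = (fun (p : Int × Int) (i : String) =>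
      let runs := pvRunLengths i
      let p1 := if 2 ∈ runs then (p.1 + 1, p.2) else p
      if 3 ∈ runs then (p1.1, p1.2 + 1) else p1) := by
    funext p i
    have h2 := pv_values_iff i 2
    have h3 := pv_values_iff i 3
    norm_cast at h2 h3
    simp only [h2, h3]
  rw [hstep]
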